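-- pv_equiv track=rewrite | github.com/andrewburry/LowPolyfy | lowpolyfy/resources/geometry/Tetrahedral.py | _check_frame_bounded
-- ===== SOURCE A (Python) =====
-- def _check_frame_bounded(points: list, frame_number: int) -> bool:
--     """A method to check to see if a frame lies somewhere within the input points"""
--     # Ensure that points are crossing the frame number at least once
--     lower_bounded = False
--     upper_bounded = False
--     for point in points:
--         if point[0] <= frame_number:
--             lower_bounded = True
--         if point[0] >= frame_number:
--             upper_bounded = True
--
--     return lower_bounded and upper_bounded
-- ===== SOURCE B (Python) =====
-- def _check_frame_bounded(points: list, frame_number: int) -> bool: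
--     """A method to check to see if a frame lies somewhere within the input points"""
--     if not points:
--         return False
--     xs = [p[0] for p in points]
--     return min(xs) <= frame_number <= max(xs)
-- ===== Notes on version B (the rewrite author's own statement) =====
-- stated objective: simpler
-- what changed: Replaces the two running boolean flags with an aggregate-then-compare decomposition: guard the empty list, reduce the points to their x-extent with min/max, then one chained comparison.
import Mathlib
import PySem

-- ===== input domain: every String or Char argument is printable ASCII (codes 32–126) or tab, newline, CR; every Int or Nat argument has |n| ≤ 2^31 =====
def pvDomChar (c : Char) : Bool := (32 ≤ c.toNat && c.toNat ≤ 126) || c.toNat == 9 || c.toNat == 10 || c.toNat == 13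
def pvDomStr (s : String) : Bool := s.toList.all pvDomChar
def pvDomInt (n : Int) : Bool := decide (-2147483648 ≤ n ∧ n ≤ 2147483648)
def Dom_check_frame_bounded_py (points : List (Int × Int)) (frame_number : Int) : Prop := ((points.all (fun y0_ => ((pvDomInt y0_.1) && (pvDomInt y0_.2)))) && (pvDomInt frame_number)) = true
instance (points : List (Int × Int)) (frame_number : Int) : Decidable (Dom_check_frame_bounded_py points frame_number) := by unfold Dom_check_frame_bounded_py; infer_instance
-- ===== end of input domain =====

-- B replaces A's two running boolean flags with an explicit empty-list guard followed by
-- min/max of the x-coordinates and one chained comparison (objective: simpler).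

-- ===== PORT A =====
def check_frame_bounded_py (points : List (Int × Int)) (frame_number : Int) : Bool :=
  let st := points.foldl (fun (st : Bool × Bool) point =>
    (if point.1 ≤ frame_number then true else st.1,
     if point.1 ≥ frame_number then true else st.2)) (false, false)
  st.1 && st.2

-- ===== PORT B =====
def check_frame_bounded_py_alt (points : List (Int × Int)) (frame_number : Int) : Bool :=
  if points = [] then false
  else
    let xs := points.map (fun p => p.1)
    match PySem.List.min? xs (fun x => x), PySem.List.max? xs (fun x => x) with
    | some lo, some hi => decide (lo ≤ frame_number) && decide (frame_number ≤ hi)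
    | _, _ => false

-- ===== PRECONDITION & SPEC =====
def Spec_check_frame_bounded_py (points : List (Int × Int)) (frame_number : Int) (out : Bool) : Prop := out = check_frame_bounded_py_alt points frame_number
instance (points : List (Int × Int)) (frame_number : Int) (out : Bool) : Decidable (Spec_check_frame_bounded_py points frame_number out) := by unfold Spec_check_frame_bounded_py; infer_instance

-- ===== CLAIM (what is proved, stated in full; the proofs are below) =====
def Claim_equal_check_frame_bounded_py : Prop := ∀ (points : List (Int × Int)) (frame_number : Int), Dom_check_frame_bounded_py points frame_number → Spec_check_frame_bounded_py points frame_number (check_frame_bounded_py points frame_number)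

-- ===== LEMMAS AND PROOFS =====

-- A's fold accumulates the two flags as disjunctions with "any x ≤ f" / "any x ≥ f".
theorem pv_foldA (f : Int) : ∀ (l : List (Int × Int)) (a b : Bool),
    l.foldl (fun (st : Bool × Bool) point =>
      (if point.1 ≤ f then true else st.1,
       if point.1 ≥ f then true else st.2)) (a, b)
    = (a || l.any (fun p => decide (p.1 ≤ f)), b || l.any (fun p => decide (f ≤ p.1))) := by
  intro l
  induction l with
  | nil => simp
  | cons p t ih =>
      intro a b
      simp only [List.foldl_cons, List.any_cons, ih]
      by_cases h1 : p.1 ≤ f <;> by_cases h2 : f ≤ p.1 <;>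
        simp [h1, h2, ge_iff_le]

theorem pv_min_le (xs : List Int) (lo f : Int) (h : PySem.List.min? xs (fun x => x) = some lo) :
    (lo ≤ f) ↔ ∃ x ∈ xs, x ≤ f := by
  constructor
  · intro hle
    exact ⟨lo, PySem.List.min?_mem h, hle⟩
  · rintro ⟨x, hx, hxf⟩
    exact le_trans (PySem.List.min?_isMin h x hx) hxf

theorem pv_max_ge (xs : List Int) (hi f : Int) (h : PySem.List.max? xs (fun x => x) = some hi) :
    (f ≤ hi) ↔ ∃ x ∈ xs, f ≤ x := by
  constructor
  · intro hle
    exact ⟨hi, PySem.List.max?_mem h, hle⟩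
  · rintro ⟨x, hx, hxf⟩
    exact le_trans hxf (PySem.List.max?_isMax h x hx)

-- ===== VERDICT (by name: the statement is the Claim_ definition above) =====
theorem check_frame_bounded_py_spec : Claim_equal_check_frame_bounded_py := by
  intro points f _
  unfold Spec_check_frame_bounded_py check_frame_bounded_py check_frame_bounded_py_alt
  simp only [pv_foldA, Bool.false_or]
  by_cases hnil : points = []
  · simp [hnil]
  · simp only [if_neg hnil]
    obtain ⟨lo, hlo⟩ : ∃ lo, PySem.List.min? (points.map (fun p => p.1)) (fun x => x) = some lo := by
      cases h : PySem.List.min? (points.map (fun p => p.1)) (fun x => x) with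
      | none => exact absurd (((PySem.List.min?_eq_none_iff _ _).mp h)) (by simp [hnil])
      | some lo => exact ⟨lo, rfl⟩
    obtain ⟨hi, hhi⟩ : ∃ hi, PySem.List.max? (points.map (fun p => p.1)) (fun x => x) = some hi := by
      cases h : PySem.List.max? (points.map (fun p => p.1)) (fun x => x) with
      | none => exact absurd (((PySem.List.max?_eq_none_iff _ _).mp h)) (by simp [hnil])
      | some hi => exact ⟨hi, rfl⟩
    simp only [hlo, hhi]
    have h1 := pv_min_le (points.map (fun p => p.1)) lo f hlo
    have h2 := pv_max_ge (points.map (fun p => p.1)) hi f hhi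
    simp only [List.mem_map] at h1 h2
    congr 1
    · rw [Bool.eq_iff_iff]
      simp only [List.any_eq_true, decide_eq_true_eq]
      constructor
      · rintro ⟨p, hp, hle⟩; exact h1.mpr ⟨p.1, ⟨p, hp, rfl⟩, hle⟩
      · intro h; obtain ⟨x, ⟨p, hp, rfl⟩, hle⟩ := h1.mp h; exact ⟨p, hp, hle⟩
    · rw [Bool.eq_iff_iff]
      simp only [List.any_eq_true, decide_eq_true_eq]
      constructor
      · rintro ⟨p, hp, hle⟩; exact h2.mpr ⟨p.1, ⟨p, hp, rfl⟩, hle⟩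
      · intro h; obtain ⟨x, ⟨p, hp, rfl⟩, hle⟩ := h2.mp h; exact ⟨p, hp, hle⟩
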